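-- pv_equiv track=rewrite | github.com/led5/CodingChallenges | MostCommonSubstring/most_common_substring.py | mostCommonSubstring
-- ===== SOURCE A (Python) =====
-- def mostCommonK(dna, k):
--
--     best = '' # the longest string
--     bestCount = 0 # the highest frequency
--
--     for i in range(len(dna)-k+1):
--             candidate  = dna[i:i+k]
--             count = 1
--             for j in range(i+1, len(dna)-k+1):
--                 check = dna[j: j+k]
--                 if check == candidate :
--                     count += 1
--             if count > bestCount:
--                 best = candidate
--                 bestCount = count
--
--     return (best, bestCount)
--
-- def mostCommonSubstring(dna, k, m):
--
--      """
--       Running: For example, mostCommonSubstring('gactctcagc', 2, 6) returns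
--      'ctc' since it occurs twice and is longer than 'ct' and 'tc' which each
--       also occur twice, and all other substrings of length 2, 3, 4, 5, or 6
--       only occur once. Note that the occurrences can overlap.
--     """
--
--      commonString = '' # most common string overall
--      highestCount = 0 # greatest frequency overall
--
--      for i in range(k,m):
--             x, y = mostCommonK(dna, i)
--             if y > highestCount:
--                 commonString = x
--                 highestCount = y
--      return commonString
-- ===== SOURCE B (Python) =====
-- def mostCommonSubstring(dna, k, m):
--     # One global counter over all (length, substring) pairs, filled length-major
--     # in first-appearance order, then a single scan for the first maximal count.
--     counts = {}
--     for length in range(k, m):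
--         for i in range(len(dna) - length + 1):
--             key = (length, dna[i:i+length])
--             counts[key] = counts.get(key, 0) + 1
--     best, bestCount = '', 0
--     for (length, s), c in counts.items():
--         if c > bestCount:
--             best, bestCount = s, c
--     return best
-- ===== Notes on version B (the rewrite author's own statement) =====
-- stated objective: alternative
-- what changed: A's per-length quadratic rescan (each candidate re-compared against every later window) plus a per-length best that is then merged into a global best is replaced by one global hash counter keyed by (length, substring) filled in a single length-major pass, followed by one scan over the counter's insertion-ordered items taking the first strictly-improving count; per length this is O(n*k) counting instead of O(n^2*k) rescanning.
import Mathlib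
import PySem

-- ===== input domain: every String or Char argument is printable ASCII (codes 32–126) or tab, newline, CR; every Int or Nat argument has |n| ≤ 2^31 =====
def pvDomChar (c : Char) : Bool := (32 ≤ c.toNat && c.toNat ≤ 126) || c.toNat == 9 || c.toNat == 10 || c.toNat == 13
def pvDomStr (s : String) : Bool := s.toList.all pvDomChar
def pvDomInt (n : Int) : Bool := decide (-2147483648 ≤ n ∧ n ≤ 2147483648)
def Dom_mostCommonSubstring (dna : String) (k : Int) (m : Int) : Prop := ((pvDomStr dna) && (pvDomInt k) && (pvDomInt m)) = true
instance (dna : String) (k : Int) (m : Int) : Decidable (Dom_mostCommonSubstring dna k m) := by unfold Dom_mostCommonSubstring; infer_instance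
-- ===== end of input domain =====

-- B replaces A's per-length quadratic rescan and per-length best with ONE global hash
-- counter keyed by (length, substring) plus a single final scan over its items
-- (objective: alternative algorithm); the equivalence proved below is unconditional.

-- ===== PORT A =====
def mostCommonK (dna : String) (k : Int) : String × Int :=
  (PySem.List.pyRange 0 (PySem.Str.len dna - k + 1)).foldl
    (fun st i =>
      let candidate := PySem.Str.slice dna (some i) (some (i + k))
      let count := (PySem.List.pyRange (i + 1) (PySem.Str.len dna - k + 1)).foldl
        (fun c j =>
          let check := PySem.Str.slice dna (some j) (some (j + k))
          if check == candidate then c + 1 else c) (1 : Int)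
      if count > st.2 then (candidate, count) else st)
    ("", 0)

def mostCommonSubstring (dna : String) (k : Int) (m : Int) : String :=
  ((PySem.List.pyRange k m).foldl
    (fun st i =>
      let xy := mostCommonK dna i
      if xy.2 > st.2 then (xy.1, xy.2) else st)
    (("", 0) : String × Int)).1

-- ===== PORT B =====
def mostCommonSubstring_alt (dna : String) (k : Int) (m : Int) : String :=
  let counts : PySem.Dict (Int × String) Int :=
    (PySem.List.pyRange k m).foldl
      (fun d length =>
        (PySem.List.pyRange 0 (PySem.Str.len dna - length + 1)).foldl
          (fun d i =>
            let key : Int × String := (length, PySem.Str.slice dna (some i) (some (i + length)))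
            d.insert key (d.getD key 0 + 1))
          d)
      PySem.Dict.empty
  (counts.items.foldl
    (fun st p => if p.2 > st.2 then (p.1.2, p.2) else st)
    (("", 0) : String × Int)).1

-- ===== PRECONDITION & SPEC =====
def Spec_mostCommonSubstring (dna : String) (k : Int) (m : Int) (out : String) : Prop := out = mostCommonSubstring_alt dna k m
instance (dna : String) (k : Int) (m : Int) (out : String) : Decidable (Spec_mostCommonSubstring dna k m out) := by unfold Spec_mostCommonSubstring; infer_instance

-- ===== CLAIM =====
def Claim_equal_mostCommonSubstring : Prop := ∀ (dna : String) (k : Int) (m : Int), Dom_mostCommonSubstring dna k m → Spec_mostCommonSubstring dna k m (mostCommonSubstring dna k m)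

-- ===== LEMMAS AND PROOFS =====

-- the strict-improvement scan both programs reduce to
def bestFold (l : List (String × Int)) (st : String × Int) : String × Int :=
  l.foldl (fun st p => if p.2 > st.2 then (p.1, p.2) else st) st

-- all windows of one length, in order of position
def slicesOf (dna : String) (i : Int) : List String :=
  (PySem.List.pyRange 0 (PySem.Str.len dna - i + 1)).map
    (fun j => PySem.Str.slice dna (some j) (some (j + i)))

-- distinct substrings of one length, first-appearance order, with their counts
def itemsOf (dna : String) (i : Int) : List (String × Int) :=
  (PySem.Set.ofList (slicesOf dna i)).map
    (fun s => (s, (List.count s (slicesOf dna i) : Int)))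

-- each candidate paired with A's count for it: itself plus its later occurrences
def suffList : List String → List (String × Int)
  | [] => []
  | c :: r => (c, 1 + (List.count c r : Int)) :: suffList r

theorem bestFold_cons (p : String × Int) (l : List (String × Int)) (st : String × Int) :
    bestFold (p :: l) st = bestFold l (if p.2 > st.2 then (p.1, p.2) else st) := rfl

theorem bestFold_append (l₁ l₂ : List (String × Int)) (st : String × Int) :
    bestFold (l₁ ++ l₂) st = bestFold l₂ (bestFold l₁ st) := List.foldl_append

-- the running count never decreases
theorem bestFold_mono (l : List (String × Int)) :
    ∀ st : String × Int, st.2 ≤ (bestFold l st).2 := by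
  induction l with
  | nil => intro st; exact le_refl _
  | cons p r ih =>
    intro st
    rw [bestFold_cons]
    refine le_trans ?_ (ih _)
    split <;> omega

-- restarting from ("", 0) and merging with strict '>' equals continuing the scan
theorem bestFold_comp (l : List (String × Int)) :
    ∀ (a b : String × Int), a.2 ≤ b.2 →
      bestFold l b = if (bestFold l a).2 > b.2 then bestFold l a else b := by
  induction l with
  | nil =>
    intro a b h
    simp only [bestFold, List.foldl_nil]
    rw [if_neg (by omega)]
  | cons p r ih =>
    intro a b h
    rw [bestFold_cons, bestFold_cons]
    by_cases hpb : p.2 > b.2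
    · have hpa : p.2 > a.2 := by omega
      rw [if_pos hpb, if_pos hpa]
      have hm : p.2 ≤ (bestFold r (p.1, p.2)).2 := bestFold_mono r (p.1, p.2)
      rw [if_pos (by omega)]
    · rw [if_neg hpb]
      by_cases hpa : p.2 > a.2
      · rw [if_pos hpa]
        exact ih (p.1, p.2) b (by omega)
      · rw [if_neg hpa]
        exact ih a b h

-- an entry that does not beat the initial threshold never fires and can be deleted
theorem bestFold_skip (p : String × Int) (l₂ : List (String × Int)) :
    ∀ (l₁ : List (String × Int)) (st : String × Int), p.2 ≤ st.2 →
      bestFold (l₁ ++ p :: l₂) st = bestFold (l₁ ++ l₂) st := by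
  intro l₁
  induction l₁ with
  | nil =>
    intro st h
    simp only [List.nil_append, bestFold_cons]
    rw [if_neg (by omega)]
  | cons q l₁ ih =>
    intro st h
    simp only [List.cons_append, bestFold_cons]
    apply ih
    split <;> omega

-- A's suffix-count scan equals the scan over distinct substrings with total counts:
-- a string's first occurrence carries its total count, and each repeat carries a
-- strictly smaller count, so it can never beat a threshold that already saw the first.
theorem suffList_counter (cs : List String) :
    ∀ st, bestFold (suffList cs) st
      = bestFold ((PySem.Set.ofList cs).map (fun s => (s, (List.count s cs : Int)))) st := by
  induction cs with
  | nil => intro st; rfl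
  | cons c r ih =>
    intro st
    rw [PySem.Set.ofList_cons]
    simp only [suffList, List.map_cons, bestFold_cons, List.count_cons_self]
    have hcnt : ((List.count c r + 1 : Nat) : Int) = 1 + (List.count c r : Int) := by push_cast; ring
    rw [hcnt, ih]
    set st' := if 1 + (List.count c r : Int) > st.2 then (c, 1 + (List.count c r : Int)) else st with hst'
    have hle : (List.count c r : Int) ≤ st'.2 := by
      rw [hst']; split_ifs with h
      · show (List.count c r : Int) ≤ 1 + (List.count c r : Int); omega
      · omega
    by_cases hc : c ∈ r
    · have hcs : c ∈ PySem.Set.ofList r := (PySem.Set.mem_ofList r c).mpr hc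
      obtain ⟨D₁, D₂, hsplit⟩ := List.append_of_mem hcs
      have hnd : (D₁ ++ c :: D₂).Nodup := hsplit ▸ PySem.Set.nodup_ofList r
      have hc₁ : c ∉ D₁ := fun h => (List.disjoint_of_nodup_append hnd) h (List.mem_cons_self ..)
      have hc₂ : c ∉ D₂ := by
        have := (List.nodup_append.mp hnd).2.1
        exact (List.nodup_cons.mp this).1
      have hdisc : PySem.Set.discard (PySem.Set.ofList r) c = D₁ ++ D₂ := by
        rw [hsplit]
        simp only [PySem.Set.discard, List.filter_append, List.filter_cons]
        rw [List.filter_eq_self.mpr, List.filter_eq_self.mpr]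
        · simp
        · intro a ha
          simpa using ne_of_mem_of_not_mem ha hc₂
        · intro a ha
          simpa using ne_of_mem_of_not_mem ha hc₁
      rw [hdisc, hsplit]
      simp only [List.map_append, List.map_cons]
      rw [bestFold_skip _ _ _ _ hle]
      rw [← List.map_append, ← List.map_append]
      apply congrArg (bestFold · st')
      apply List.map_congr_left
      intro s hs
      have hsne : s ≠ c := by
        rcases List.mem_append.mp hs with h1 | h2
        · exact fun he => hc₁ (he ▸ h1)
        · exact fun he => hc₂ (he ▸ h2)
      have hb : (c == s) = false := beq_eq_false_iff_ne.mpr (Ne.symm hsne)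
      simp [List.count_cons, hb]
    · have hdisc : PySem.Set.discard (PySem.Set.ofList r) c = PySem.Set.ofList r := by
        simp only [PySem.Set.discard]
        apply List.filter_eq_self.mpr
        intro a ha
        have : a ∈ r := (PySem.Set.mem_ofList r a).mp ha
        simpa using ne_of_mem_of_not_mem this hc
      rw [hdisc]
      apply congrArg (bestFold · st')
      apply List.map_congr_left
      intro s hs
      have hsne : s ≠ c := ne_of_mem_of_not_mem ((PySem.Set.mem_ofList r s).mp hs) hc
      have hb : (c == s) = false := beq_eq_false_iff_ne.mpr (Ne.symm hsne)
      simp [List.count_cons, hb]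

-- A's two nested range loops, unrolled, are exactly the suffix-count scan
theorem bridgeA (f : Int → String) (N : Int) :
    ∀ (t : Nat) (a : Int), (N - a).toNat = t → ∀ (st : String × Int),
      (PySem.List.pyRange a N).foldl
        (fun st i =>
          let candidate := f i
          let count := (PySem.List.pyRange (i + 1) N).foldl
            (fun c j => let check := f j; if check == candidate then c + 1 else c) (1 : Int)
          if count > st.2 then (candidate, count) else st) st
      = bestFold (suffList ((PySem.List.pyRange a N).map f)) st := by
  intro t
  induction t with
  | zero =>
    intro a ha st
    rw [PySem.List.pyRange_one_eq_nil (by omega)]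
    rfl
  | succ n ih =>
    intro a ha st
    have hab : a < N := by omega
    rw [PySem.List.pyRange_one_cons hab]
    simp only [List.foldl_cons, List.map_cons, suffList, bestFold_cons]
    rw [ih (a + 1) (by omega)]
    congr 1
    rw [PySem.List.foldl_count_if (fun j => f j == f a)]
    rw [List.count, List.countP_map]
    rfl

-- per length, A's nested scan is the strict-improvement scan over itemsOf
theorem mostCommonK_eq (dna : String) (i : Int) :
    mostCommonK dna i = bestFold (itemsOf dna i) ("", 0) :=
  (bridgeA (fun j => PySem.Str.slice dna (some j) (some (j + i)))
      (PySem.Str.len dna - i + 1) (PySem.Str.len dna - i + 1 - 0).toNat 0 rfl ("", 0)).trans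
    (suffList_counter _ ("", 0))

-- A's outer loop is the scan over the concatenation of all lengths' items
theorem foldA (dna : String) (L : List Int) :
    ∀ (st : String × Int), 0 ≤ st.2 →
      L.foldl (fun st i =>
          let xy := mostCommonK dna i
          if xy.2 > st.2 then (xy.1, xy.2) else st) st
      = bestFold (L.flatMap (itemsOf dna)) st := by
  induction L with
  | nil => intro st _; rfl
  | cons i L ih =>
    intro st hst
    simp only [List.foldl_cons, List.flatMap_cons]
    rw [bestFold_append]
    have hstep : (let xy := mostCommonK dna i;
        if xy.2 > st.2 then (xy.1, xy.2) else st) = bestFold (itemsOf dna i) st := by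
      simp only [mostCommonK_eq]
      rw [bestFold_comp (itemsOf dna i) ("", 0) st hst]
    rw [hstep]
    exact ih _ (le_trans hst (bestFold_mono _ st))

-- Set.ofList distributes over append when the two halves share no element
theorem ofList_append_disjoint {α : Type} [BEq α] [LawfulBEq α] (l₁ : List α) :
    ∀ (l₂ : List α), (∀ x ∈ l₂, x ∉ l₁) →
      PySem.Set.ofList (l₁ ++ l₂) = PySem.Set.ofList l₁ ++ PySem.Set.ofList l₂ := by
  induction l₁ with
  | nil => intro l₂ _; rfl
  | cons c l₁ ih =>
    intro l₂ h
    rw [List.cons_append, PySem.Set.ofList_cons, PySem.Set.ofList_cons,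
      ih l₂ (fun x hx hm => h x hx (List.mem_cons_of_mem c hm))]
    simp only [PySem.Set.discard, List.filter_append]
    have hf : List.filter (fun y => !y == c) (PySem.Set.ofList l₂) = PySem.Set.ofList l₂ := by
      apply List.filter_eq_self.mpr
      intro a ha
      have ha' : a ∈ l₂ := (PySem.Set.mem_ofList l₂ a).mp ha
      have hne : a ≠ c := fun he => h a ha' (he ▸ List.mem_cons_self ..)
      simp [hne]
    rw [hf, List.cons_append]

-- Set.ofList commutes with an injective map
theorem ofList_map_inj {α β : Type} [BEq α] [LawfulBEq α] [BEq β] [LawfulBEq β]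
    (f : α → β) (hf : Function.Injective f) (l : List α) :
    PySem.Set.ofList (l.map f) = (PySem.Set.ofList l).map f := by
  induction l with
  | nil => rfl
  | cons c l ih =>
    rw [List.map_cons, PySem.Set.ofList_cons, PySem.Set.ofList_cons, ih, List.map_cons]
    congr 1
    simp only [PySem.Set.discard, List.filter_map]
    congr 1
    apply List.filter_congr
    intro a _
    simp only [Function.comp]
    by_cases h : a = c
    · subst h; simp
    · have h1 : (a == c) = false := beq_eq_false_iff_ne.mpr h
      have h2 : (f a == f c) = false := beq_eq_false_iff_ne.mpr (fun he => h (hf he))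
      simp [h1, h2]

-- tagging each block with its (distinct) length keeps blocks disjoint, so the
-- global set of keys is the concatenation of the per-length key sets
theorem ofList_flatMap_tagged (blk : Int → List String) :
    ∀ (L : List Int), L.Nodup →
      PySem.Set.ofList (L.flatMap (fun i => (blk i).map (fun s => (i, s))))
      = L.flatMap (fun i => ((PySem.Set.ofList (blk i)).map (fun s => (i, s)))) := by
  intro L
  induction L with
  | nil => intro _; rfl
  | cons i L ih =>
    intro hnd
    obtain ⟨hi, hnd'⟩ := List.nodup_cons.mp hnd
    rw [List.flatMap_cons, List.flatMap_cons]
    rw [ofList_append_disjoint]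
    · rw [ih hnd']
      congr 1
      exact ofList_map_inj (fun s => (i, s)) (fun a b h => (Prod.mk.injEq i a i b ▸ h).2) (blk i)
    · intro x hx hmem
      obtain ⟨j, hj, hxj⟩ := List.mem_flatMap.mp hx
      obtain ⟨s, _, hsx⟩ := List.mem_map.mp hxj
      obtain ⟨t, _, htx⟩ := List.mem_map.mp hmem
      have : j = i := by rw [← hsx] at htx; exact (Prod.mk.injEq ..).mp htx.symm |>.1
      exact hi (this ▸ hj)

-- the global count of a tagged key is its count within its own length's block
theorem count_flatMap_tagged (blk : Int → List String) (i : Int) (s : String) :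
    ∀ (L : List Int), L.Nodup → i ∈ L →
      List.count (i, s) (L.flatMap (fun j => (blk j).map (fun t => (j, t))))
      = List.count s (blk i) := by
  intro L
  induction L with
  | nil => intro _ h; exact absurd h (List.not_mem_nil)
  | cons j L ih =>
    intro hnd hmem
    obtain ⟨hj, hnd'⟩ := List.nodup_cons.mp hnd
    rw [List.flatMap_cons, List.count_append]
    by_cases hij : j = i
    · subst hij
      have h0 : List.count (j, s) (L.flatMap (fun j' => (blk j').map (fun t => (j', t)))) = 0 := by
        apply List.count_eq_zero.mpr
        intro hm
        obtain ⟨j', hj', hxj⟩ := List.mem_flatMap.mp hm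
        obtain ⟨t, _, htx⟩ := List.mem_map.mp hxj
        have : j' = j := ((Prod.mk.injEq ..).mp htx).1
        exact hj (this ▸ hj')
      rw [h0, List.count_map_of_injective (blk j) (fun t => (j, t))
        (fun a b h => ((Prod.mk.injEq ..).mp h).2) s, Nat.add_zero]
    · have hiL : i ∈ L := by
        rcases List.mem_cons.mp hmem with h | h
        · exact absurd h.symm hij
        · exact h
      have h0 : List.count (i, s) ((blk j).map (fun t => (j, t))) = 0 := by
        apply List.count_eq_zero.mpr
        intro hm
        obtain ⟨t, _, htx⟩ := List.mem_map.mp hm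
        exact hij ((Prod.mk.injEq ..).mp htx).1
      rw [h0, ih hnd' hiL, Nat.zero_add]

-- ===== VERDICT =====
theorem mostCommonSubstring_spec : Claim_equal_mostCommonSubstring := by
  intro dna k m _
  unfold Spec_mostCommonSubstring
  -- A's side: the scan over the concatenated per-length items
  have hA : mostCommonSubstring dna k m
      = (bestFold ((PySem.List.pyRange k m).flatMap (itemsOf dna)) ("", 0)).1 := by
    unfold mostCommonSubstring
    rw [foldA dna (PySem.List.pyRange k m) ("", 0) (le_refl 0)]
  -- B's side
  have hnd : (PySem.List.pyRange k m).Nodup := PySem.List.nodup_pyRange_one k m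
  set big : List (Int × String) :=
    (PySem.List.pyRange k m).flatMap (fun i => (slicesOf dna i).map (fun s => (i, s))) with hbig
  have hcounts : ((PySem.List.pyRange k m).foldl
      (fun d length =>
        (PySem.List.pyRange 0 (PySem.Str.len dna - length + 1)).foldl
          (fun d i =>
            let key : Int × String := (length, PySem.Str.slice dna (some i) (some (i + length)))
            d.insert key (d.getD key 0 + 1))
          d)
      (PySem.Dict.empty : PySem.Dict (Int × String) Int))
      = PySem.Dict.counter big := by
    rw [← PySem.Dict.foldl_insert_getD_add_one_eq_counter, hbig, List.foldl_flatMap]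
    apply PySem.List.foldl_congr_mem
    intro d i _
    rw [List.foldl_map]
    unfold slicesOf
    rw [List.foldl_map]
  have hitems : (PySem.Dict.counter big).items.map (fun p => (p.1.2, p.2))
      = (PySem.List.pyRange k m).flatMap (itemsOf dna) := by
    rw [PySem.Dict.items_counter, hbig, ofList_flatMap_tagged (slicesOf dna) _ hnd]
    rw [List.map_flatMap, List.map_flatMap]
    apply List.flatMap_congr
    intro i hi
    rw [List.map_map, List.map_map]
    unfold itemsOf
    apply List.map_congr_left
    intro s _
    simp only [Function.comp]
    rw [count_flatMap_tagged (slicesOf dna) i s _ hnd hi]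
  rw [hA, ← hitems]
  unfold mostCommonSubstring_alt
  simp only [hcounts]
  unfold bestFold
  rw [List.foldl_map]
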